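-- pv_equiv track=rewrite | github.com/soonyoung-hwang/Algorithm | 프로그래머스/2/340211. ［PCCP 기출문제］ 3번 ／ 충돌위험 찾기/［PCCP 기출문제］ 3번 ／ 충돌위험 찾기.py | solution
-- ===== SOURCE A (Python) =====
-- from collections import defaultdict
--
-- def solution(points, routes):
--     answer = 0
--
--     N = len(routes)     # N : robot의 수
--     M = len(routes[0])     # M : 방문해야할 장소의 수
--
--     scenarios = [[] for _ in range(20001)]  # 해당 시간에 좌표에 이동한 애들
--
--     for i in range(N):  # robot 마다, scenario를 채워준다.
--         idx = 0
--         r, c = points[routes[i][0]-1]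
--         scenarios[0].append((r, c))
--
--         for j in range(1, M):
--             tr, tc = points[routes[i][j]-1]
--             while (r, c) != (tr, tc):
--                 idx += 1
--                 if r != tr:
--                     r += (tr-r)//abs(tr-r)
--                 elif c != tc:
--                     c += (tc-c)//abs(tc-c)
--
--                 scenarios[idx].append((r,c))
--
--     for i in range(20001):
--         if not scenarios[i]:
--             break
--
--         temp_dict = defaultdict(int)
--         for r, c in scenarios[i]:
--             temp_dict[(r, c)] += 1
--
--         for key in temp_dict.keys():
--             if temp_dict[key] > 1:
--                 answer += 1
--
--     return answer
-- ===== SOURCE B (Python) =====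
-- def _seg(r, c, tr, tc):
--     sr = 1 if tr >= r else -1
--     sc = 1 if tc >= c else -1
--     return [(r + sr * k, c) for k in range(1, abs(tr - r) + 1)] + \
--            [(tr, c + sc * k) for k in range(1, abs(tc - c) + 1)]
--
-- def solution(points, routes):
--     M = len(routes[0])
--     seen = set()
--     collided = set()
--     for route in routes:
--         r, c = points[route[0] - 1]
--         path = [(r, c)]
--         for j in range(1, M):
--             tr, tc = points[route[j] - 1]
--             path += _seg(r, c, tr, tc)
--             r, c = tr, tc
--         for t, pos in enumerate(path):
--             ev = (t, pos)
--             if ev in seen: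
--                 collided.add(ev)
--             else:
--                 seen.add(ev)
--     return len(collided)
-- ===== Notes on version B (the rewrite author's own statement) =====
-- stated objective: alternative
-- what changed: B builds each robot's whole path arithmetically (each leg is two range() comprehensions, no unit-step while loop), timestamps it with enumerate, and detects collisions by first-repeat membership in a seen/collided pair of sets returning len(collided); A instead step-simulates every move into 20001 per-time buckets and runs a second per-timestep counting phase with a temp defaultdict.
import Mathlib
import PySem

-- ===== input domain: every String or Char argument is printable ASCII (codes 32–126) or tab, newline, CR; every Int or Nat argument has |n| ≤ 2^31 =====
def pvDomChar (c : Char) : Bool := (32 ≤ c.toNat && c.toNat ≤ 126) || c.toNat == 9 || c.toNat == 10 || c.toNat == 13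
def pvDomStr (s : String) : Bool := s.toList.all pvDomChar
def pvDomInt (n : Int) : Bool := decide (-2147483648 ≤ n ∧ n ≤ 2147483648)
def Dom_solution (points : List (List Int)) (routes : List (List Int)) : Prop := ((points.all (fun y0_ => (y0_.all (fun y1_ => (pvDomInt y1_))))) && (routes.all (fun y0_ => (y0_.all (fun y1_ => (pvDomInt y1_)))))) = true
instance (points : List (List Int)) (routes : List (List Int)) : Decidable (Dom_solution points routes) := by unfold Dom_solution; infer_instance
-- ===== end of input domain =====

-- B builds each robot's whole path arithmetically (each leg is two range-comprehensions, no
-- unit-step while loop), timestamps it with enumerate, and detects collisions by first-repeat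
-- membership in a seen/collided pair of sets; A's 20001-bucket table, its step-by-step while
-- loop and its second per-timestep counting phase all disappear (objective: alternative).

-- ===== PORT A =====

-- `r, c = points[k-1]` (raises unless the wrapped index is valid and the point is a pair; Pre_ excludes that)
def getPointA (points : List (List Int)) (k : Int) : Int × Int :=
  match PySem.List.pyGet? points (k - 1) with
  | some [a, b] => (a, b)
  | _ => (0, 0)

-- `scenarios[t].append(x)` (t out of range raises IndexError in Python; Pre_ excludes that)
def appendAtA (scen : List (List (Int × Int))) (t : Int) (x : Int × Int) : List (List (Int × Int)) :=
  if 0 ≤ t ∧ t.toNat < scen.length then scen.set t.toNat (scen.getD t.toNat [] ++ [x]) else scen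

-- the `while (r, c) != (tr, tc)` loop of A; the Nat fuel is exactly the remaining Manhattan
-- distance (each iteration reduces it by 1), so the 0-fuel arm coincides with the exit test
def walkAGo : Nat → Int → Int → Int → Int → Int → List (List (Int × Int)) →
    Int × Int × Int × List (List (Int × Int))
  | 0, _, _, r, c, idx, scen => (r, c, idx, scen)
  | fuel + 1, tr, tc, r, c, idx, scen =>
    if ¬ (r = tr ∧ c = tc) then
      let idx' := idx + 1
      let rc' : Int × Int :=
        if r ≠ tr then (r + PySem.Int.floordiv (tr - r) |tr - r|, c)
        else if c ≠ tc then (r, c + PySem.Int.floordiv (tc - c) |tc - c|)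
        else (r, c)
      walkAGo fuel tr tc rc'.1 rc'.2 idx' (appendAtA scen idx' rc')
    else (r, c, idx, scen)

def walkA (tr tc r c idx : Int) (scen : List (List (Int × Int))) :
    Int × Int × Int × List (List (Int × Int)) :=
  walkAGo ((tr - r).natAbs + (tc - c).natAbs) tr tc r c idx scen

-- the `for j in range(1, M)` loop of A (state: r, c, idx, scenarios)
def segA (points : List (List Int)) (route : List Int) (M : Int)
    (st : Int × Int × Int × List (List (Int × Int))) :
    Int × Int × Int × List (List (Int × Int)) :=
  (PySem.List.pyRange 1 M 1).foldl
    (fun st j =>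
      let tgt := getPointA points (PySem.List.pyGetD route j 0)
      walkA tgt.1 tgt.2 st.1 st.2.1 st.2.2.1 st.2.2.2)
    st

-- one timestep of A's second phase: defaultdict count, then count keys with count > 1
def countAtA (l : List (Int × Int)) : Int :=
  let d := l.foldl (fun d p => d.modify p 0 (· + 1)) (PySem.Dict.empty : PySem.Dict (Int × Int) Int)
  d.keys.foldl (fun a k => if d.getD k 0 > 1 then a + 1 else a) 0

-- the `for i in range(20001): if not scenarios[i]: break; …` loop of A
def phase2A (scen : List (List (Int × Int))) : Nat → Nat → Int → Int
  | 0, _, ans => ans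
  | fuel + 1, i, ans =>
    let s := scen.getD i []
    if s = [] then ans
    else phase2A scen fuel (i + 1) (ans + countAtA s)

def solution (points : List (List Int)) (routes : List (List Int)) : Int :=
  let N : Int := routes.length
  let M : Int := ((PySem.List.pyGetD routes 0 []).length : Int)
  let scen0 : List (List (Int × Int)) := List.replicate 20001 []
  let scen := (PySem.List.pyRange 0 N 1).foldl
    (fun scen i =>
      let route := PySem.List.pyGetD routes i []
      let s := getPointA points (PySem.List.pyGetD route 0 0)
      (segA points route M (s.1, s.2, 0, appendAtA scen 0 s)).2.2.2)
    scen0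
  phase2A scen 20001 0 0

-- ===== PORT B =====

-- `r, c = points[k-1]` (same raising corners, excluded by Pre_)
def getPointB (points : List (List Int)) (k : Int) : Int × Int :=
  match PySem.List.pyGet? points (k - 1) with
  | some [a, b] => (a, b)
  | _ => (0, 0)

-- `_seg(r, c, tr, tc)`: one leg of the path, built from two range comprehensions
def segPyB (r c tr tc : Int) : List (Int × Int) :=
  let sr : Int := if tr ≥ r then 1 else -1
  let sc : Int := if tc ≥ c then 1 else -1
  (PySem.List.pyRange 1 (|tr - r| + 1) 1).map (fun k => (r + sr * k, c)) ++
  (PySem.List.pyRange 1 (|tc - c| + 1) 1).map (fun k => (tr, c + sc * k))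

def solution_alt (points : List (List Int)) (routes : List (List Int)) : Int :=
  -- M = len(routes[0]) is inlined at its single use site
  PySem.Set.len
    (routes.foldl
    (fun (sc : PySem.Set (Int × Int × Int) × PySem.Set (Int × Int × Int)) route =>
      let s := getPointB points (PySem.List.pyGetD route 0 0)
      -- `path = [(r, c)]; for j in range(1, M): path += _seg(...); r, c = tr, tc`
      let bp := (PySem.List.pyRange 1 ((PySem.List.pyGetD routes 0 []).length : Int) 1).foldl
        (fun (ps : Int × Int × List (Int × Int)) j =>
          let tgt := getPointB points (PySem.List.pyGetD route j 0)
          (tgt.1, tgt.2, ps.2.2 ++ segPyB ps.1 ps.2.1 tgt.1 tgt.2))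
        (s.1, s.2, [(s.1, s.2)])
      -- `for t, pos in enumerate(path): ev = (t, pos); if ev in seen: collided.add(ev) else seen.add(ev)`
      (PySem.List.enumerate bp.2.2 0).foldl
        (fun sc tp =>
          if PySem.Set.contains sc.1 tp then (sc.1, PySem.Set.add sc.2 tp)
          else (PySem.Set.add sc.1 tp, sc.2))
        sc)
    (PySem.Set.empty, PySem.Set.empty)).2

-- ===== PRECONDITION & SPEC =====

-- Pre_-side copy of `points[k-1]` (Pre_ may not reference the ports)
def pvPt (points : List (List Int)) (k : Int) : Int × Int :=
  match PySem.List.pyGet? points (k - 1) with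
  | some [a, b] => (a, b)
  | _ => (0, 0)

def pvManh (p q : Int × Int) : Int := |q.1 - p.1| + |q.2 - p.2|

def pvPathLen : List (Int × Int) → Int
  | p :: q :: rest => pvManh p q + pvPathLen (q :: rest)
  | _ => 0

-- Pre_ excludes exactly the inputs where the Python A raises: empty routes / an empty first route
-- (routes[i][0] IndexError), a route shorter than M = len(routes[0]) (IndexError), a referenced
-- route entry whose (wraparound) index into points is invalid or names a point that is not a pair
-- (IndexError / unpacking ValueError), and a robot whose total Manhattan path length exceeds
-- 20000 (scenarios[idx] IndexError).
def Pre_solution (points : List (List Int)) (routes : List (List Int)) : Prop :=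
  routes ≠ [] ∧ 1 ≤ routes.headI.length ∧
  ∀ rt ∈ routes,
    routes.headI.length ≤ rt.length ∧
    (∀ k ∈ rt.take routes.headI.length,
      ((PySem.List.pyGet? points (k - 1)).map (fun p => p.length == 2)).getD false = true) ∧
    pvPathLen ((rt.take routes.headI.length).map (pvPt points)) ≤ 20000

instance (points : List (List Int)) (routes : List (List Int)) : Decidable (Pre_solution points routes) := by
  unfold Pre_solution; infer_instance

def pvWitness_solution : List (List Int) × List (List Int) :=
  ([[0, 0], [0, 2], [2, 0]], [[1, 2, 3], [3, 2, 1]])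

def Spec_solution (points : List (List Int)) (routes : List (List Int)) (out : Int) : Prop := out = solution_alt points routes
instance (points : List (List Int)) (routes : List (List Int)) (out : Int) : Decidable (Spec_solution points routes out) := by unfold Spec_solution; infer_instance

-- ===== CLAIM (what is proved, stated in full; the proofs are below) =====
def Claim_equal_solution : Prop := ∀ (points : List (List Int)) (routes : List (List Int)), Dom_solution points routes → Pre_solution points routes → Spec_solution points routes (solution points routes)

-- ===== LEMMAS AND PROOFS =====

-- the unit step both programs' paths take; A's floordiv step equals it (stepA_eq), and B's
-- range-built legs enumerate exactly its orbit (walkPos_row_s / walkPos_col_s)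
def pvStep (tr tc r c : Int) : Int × Int :=
  if r ≠ tr then (if tr > r then r + 1 else r - 1, c)
  else if c ≠ tc then (r, if tc > c then c + 1 else c - 1)
  else (r, c)

def pvDist (tr tc r c : Int) : Int := ((tr - r).natAbs : Int) + ((tc - c).natAbs : Int)

theorem pvStep_dec (tr tc r c : Int) (h : ¬ (r = tr ∧ c = tc)) :
    pvDist tr tc (pvStep tr tc r c).1 (pvStep tr tc r c).2 + 1 = pvDist tr tc r c := by
  unfold pvStep pvDist; split_ifs <;> dsimp only <;> omega

-- the event stream (time, r, c) one while-loop of A emits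
def pureWalk (tr tc r c t : Int) : (Int × Int × Int) × List (Int × Int × Int) :=
  if h : ¬ (r = tr ∧ c = tc) then
    let rc' := pvStep tr tc r c
    let p := pureWalk tr tc rc'.1 rc'.2 (t + 1)
    (p.1, (t + 1, rc'.1, rc'.2) :: p.2)
  else ((r, c, t), [])
termination_by (pvDist tr tc r c).toNat
decreasing_by
  have := pvStep_dec tr tc r c h
  have h0 : 0 ≤ pvDist tr tc (pvStep tr tc r c).1 (pvStep tr tc r c).2 := by
    unfold pvDist; omega
  omega

-- the positions alone (B's path contents)
def walkPos (tr tc r c : Int) : List (Int × Int) :=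
  if h : ¬ (r = tr ∧ c = tc) then
    let rc' := pvStep tr tc r c
    rc' :: walkPos tr tc rc'.1 rc'.2
  else []
termination_by (pvDist tr tc r c).toNat
decreasing_by
  have := pvStep_dec tr tc r c h
  have h0 : 0 ≤ pvDist tr tc (pvStep tr tc r c).1 (pvStep tr tc r c).2 := by
    unfold pvDist; omega
  omega

-- the event stream of the `for j in range(1, M)` loop of A
def pureSeg (points : List (List Int)) (route : List Int) :
    List Int → Int × Int × Int → (Int × Int × Int) × List (Int × Int × Int)
  | [], st => (st, [])
  | j :: js, st =>
    let tgt := pvPt points (PySem.List.pyGetD route j 0)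
    let p := pureWalk tgt.1 tgt.2 st.1 st.2.1 st.2.2
    let q := pureSeg points route js p.1
    (q.1, p.2 ++ q.2)

-- B's concatenated path over the same legs (positions only)
def pathSeg (points : List (List Int)) (route : List Int) :
    List Int → Int × Int → (Int × Int) × List (Int × Int)
  | [], st => (st, [])
  | j :: js, st =>
    let tgt := pvPt points (PySem.List.pyGetD route j 0)
    let q := pathSeg points route js tgt
    (q.1, walkPos tgt.1 tgt.2 st.1 st.2 ++ q.2)

-- all events of one robot (the t = 0 start plus the walk events)
def evRobot (points : List (List Int)) (M : Int) (route : List Int) : List (Int × Int × Int) :=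
  let s := pvPt points (PySem.List.pyGetD route 0 0)
  (0, s.1, s.2) :: (pureSeg points route (PySem.List.pyRange 1 M 1) (s.1, s.2, 0)).2

def evAll (points : List (List Int)) (routes : List (List Int)) : List (Int × Int × Int) :=
  routes.flatMap (evRobot points ((PySem.List.pyGetD routes 0 []).length : Int))

def addEvA (scen : List (List (Int × Int))) (e : Int × Int × Int) : List (List (Int × Int)) :=
  appendAtA scen e.1 e.2

theorem getPointA_eq : getPointA = pvPt := rfl
theorem getPointB_eq : getPointB = pvPt := rfl

-- (tr-r)//abs(tr-r) is the unit step toward tr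
theorem pvFloordivSign (a : Int) (h : a ≠ 0) :
    PySem.Int.floordiv a |a| = if 0 < a then 1 else -1 := by
  rcases lt_trichotomy a 0 with hlt | hz | hgt
  · rw [abs_of_neg hlt, PySem.Int.floordiv_eq_ediv_of_pos (by omega), Int.ediv_neg,
      Int.ediv_self h, if_neg (by omega)]
  · exact absurd hz h
  · rw [abs_of_pos hgt, PySem.Int.floordiv_eq_ediv_of_pos hgt, Int.ediv_self h, if_pos hgt]

theorem stepA_eq (tr tc r c : Int) :
    (if r ≠ tr then (r + PySem.Int.floordiv (tr - r) |tr - r|, c)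
     else if c ≠ tc then (r, c + PySem.Int.floordiv (tc - c) |tc - c|)
     else (r, c)) = pvStep tr tc r c := by
  unfold pvStep
  by_cases h1 : r = tr
  · rw [if_neg (not_not_intro h1)]
    by_cases h2 : c = tc
    · rw [if_neg (not_not_intro h2)]
      simp [h1, h2]
    · rw [if_pos h2, pvFloordivSign (tc - c) (by omega)]
      split_ifs <;> simp [Prod.ext_iff] <;> omega
  · rw [if_pos h1, pvFloordivSign (tr - r) (by omega)]
    split_ifs <;> simp [Prod.ext_iff] <;> omega

theorem walkAGo_eq (fuel : Nat) : ∀ (tr tc r c t : Int) (scen : List (List (Int × Int))),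
    (tr - r).natAbs + (tc - c).natAbs = fuel →
    walkAGo fuel tr tc r c t scen =
      ((pureWalk tr tc r c t).1.1, (pureWalk tr tc r c t).1.2.1, (pureWalk tr tc r c t).1.2.2,
       (pureWalk tr tc r c t).2.foldl addEvA scen) := by
  induction fuel with
  | zero =>
    intro tr tc r c t scen hf
    have h : r = tr ∧ c = tc := by constructor <;> omega
    rw [pureWalk, dif_neg (not_not_intro h)]
    rfl
  | succ fuel ih =>
    intro tr tc r c t scen hf
    have h : ¬ (r = tr ∧ c = tc) := by
      rintro ⟨rfl, rfl⟩
      omega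
    show (if ¬ (r = tr ∧ c = tc) then _ else _) = _
    rw [if_pos h, stepA_eq]
    rw [ih tr tc (pvStep tr tc r c).1 (pvStep tr tc r c).2 (t + 1) _ (by
      have := pvStep_dec tr tc r c h
      unfold pvDist at this
      omega)]
    conv_rhs => rw [pureWalk]
    rw [dif_pos h]
    simp only [List.foldl_cons, addEvA]

theorem walkA_eq (tr tc r c t : Int) (scen : List (List (Int × Int))) :
    walkA tr tc r c t scen =
      ((pureWalk tr tc r c t).1.1, (pureWalk tr tc r c t).1.2.1, (pureWalk tr tc r c t).1.2.2,
       (pureWalk tr tc r c t).2.foldl addEvA scen) :=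
  walkAGo_eq _ tr tc r c t scen rfl

theorem segA_eq (points : List (List Int)) (route : List Int) (js : List Int)
    (r c t : Int) (scen : List (List (Int × Int))) :
    js.foldl (fun st j =>
        let tgt := getPointA points (PySem.List.pyGetD route j 0)
        walkA tgt.1 tgt.2 st.1 st.2.1 st.2.2.1 st.2.2.2) (r, c, t, scen) =
      ((pureSeg points route js (r, c, t)).1.1,
       (pureSeg points route js (r, c, t)).1.2.1,
       (pureSeg points route js (r, c, t)).1.2.2,
       (pureSeg points route js (r, c, t)).2.foldl addEvA scen) := by
  induction js generalizing r c t scen with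
  | nil => rfl
  | cons j js ih =>
    simp only [List.foldl_cons]
    rw [walkA_eq, ih]
    conv_rhs => rw [pureSeg]
    simp only [getPointA_eq, List.foldl_append, Prod.mk.eta]

theorem foldRobotsA_eq (points : List (List Int)) (M : Int) (routes' : List (List Int))
    (scen : List (List (Int × Int))) :
    routes'.foldl (fun scen route =>
        (segA points route M ((getPointA points (PySem.List.pyGetD route 0 0)).1,
          (getPointA points (PySem.List.pyGetD route 0 0)).2, 0,
          appendAtA scen 0 (getPointA points (PySem.List.pyGetD route 0 0)))).2.2.2) scen =
      (routes'.flatMap (evRobot points M)).foldl addEvA scen := by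
  induction routes' generalizing scen with
  | nil => rfl
  | cons rt rts ih =>
    simp only [List.foldl_cons, List.flatMap_cons, List.foldl_append]
    rw [ih]
    congr 1
    unfold segA
    rw [segA_eq]
    simp only [evRobot, List.foldl_cons, getPointA_eq]
    rfl

theorem solutionA_eq (points routes : List (List Int)) :
    solution points routes =
      phase2A ((evAll points routes).foldl addEvA (List.replicate 20001 [])) 20001 0 0 := by
  simp only [solution, evAll]
  rw [PySem.List.foldl_pyRange_zero_pyGetD' routes ([] : List Int)
    (fun scen route =>
      (segA points route ((PySem.List.pyGetD routes 0 []).length : Int)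
        ((getPointA points (PySem.List.pyGetD route 0 0)).1,
         (getPointA points (PySem.List.pyGetD route 0 0)).2, 0,
         appendAtA scen 0 (getPointA points (PySem.List.pyGetD route 0 0)))).2.2.2)
    (List.replicate 20001 []), foldRobotsA_eq]

-- ===== B evaluates to: number of distinct events with multiplicity > 1 =====

-- timestamp a position list with consecutive times starting at t
def stampEv : Int → List (Int × Int) → List (Int × Int × Int)
  | _, [] => []
  | t, p :: ps => (t, p.1, p.2) :: stampEv (t + 1) ps

theorem stampEv_append (a : List (Int × Int)) : ∀ (t : Int) (b : List (Int × Int)),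
    stampEv t (a ++ b) = stampEv t a ++ stampEv (t + a.length) b := by
  induction a with
  | nil => intro t b; simp [stampEv]
  | cons p ps ih =>
    intro t b
    have hlen : t + (((ps.length : Nat) : Int) + 1) = (t + 1) + ((ps.length : Nat) : Int) := by ring
    simp only [List.cons_append, stampEv, List.length_cons]
    push_cast
    rw [hlen, ih (t + 1) b]

theorem enumerate_eq_stampEv (l : List (Int × Int)) : ∀ t : Int,
    PySem.List.enumerate l t = stampEv t l := by
  induction l with
  | nil => intro t; simp [PySem.List.enumerate_nil, stampEv]
  | cons p ps ih =>
    intro t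
    rw [PySem.List.enumerate_cons, stampEv, ih (t + 1)]

theorem walkPos_length (tr tc r c : Int) :
    ((walkPos tr tc r c).length : Int) = pvDist tr tc r c := by
  fun_induction walkPos tr tc r c with
  | case1 r c h rc' ih =>
    have hd : pvDist tr tc rc'.1 rc'.2 + 1 = pvDist tr tc r c := pvStep_dec tr tc r c h
    simp only [List.length_cons]
    push_cast
    push_cast at ih
    omega
  | case2 r c h =>
    have hr : r = tr := by tauto
    have hc : c = tc := by tauto
    subst hr; subst hc
    unfold pvDist
    simp

theorem pureWalk_snd (tr tc r c t : Int) :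
    (pureWalk tr tc r c t).2 = stampEv (t + 1) (walkPos tr tc r c) := by
  fun_induction pureWalk tr tc r c t with
  | case1 r c t h rc' p ih =>
    rw [walkPos, dif_pos h]
    show (t + 1, rc'.1, rc'.2) :: p.2 = _
    rw [stampEv, ih]
  | case2 r c t h =>
    rw [walkPos, dif_neg h]
    rfl

theorem pureWalk_fst (tr tc r c t : Int) :
    (pureWalk tr tc r c t).1 = (tr, tc, t + pvDist tr tc r c) := by
  fun_induction pureWalk tr tc r c t with
  | case1 r c t h rc' p ih =>
    have hd : pvDist tr tc rc'.1 rc'.2 + 1 = pvDist tr tc r c := pvStep_dec tr tc r c h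
    rw [show (p.1, (t + 1, rc'.1, rc'.2) :: p.2).1 = p.1 from rfl, ih]
    have : t + 1 + pvDist tr tc rc'.1 rc'.2 = t + pvDist tr tc r c := by omega
    rw [this]
  | case2 r c t h =>
    have hr : r = tr := by tauto
    have hc : c = tc := by tauto
    subst hr; subst hc
    unfold pvDist
    simp

-- the column phase of a leg is exactly a range comprehension
theorem walkPos_col_s (tr tc s : Int) (hs : s = 1 ∨ s = -1) : ∀ (n : Nat) (c : Int),
    tc - c = s * n →
    walkPos tr tc tr c = (List.range n).map (fun (k : Nat) => (tr, c + s * (1 + (k : Int)))) := by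
  intro n
  induction n with
  | zero =>
    intro c hc
    have : c = tc := by omega
    subst this
    rw [walkPos, dif_neg (by tauto)]
    simp
  | succ n ih =>
    intro c hc
    have hne : c ≠ tc := by
      rcases hs with rfl | rfl <;> omega
    have hstep : pvStep tr tc tr c = (tr, c + s) := by
      unfold pvStep
      rw [if_neg (by simp), if_pos hne]
      rcases hs with rfl | rfl
      · rw [if_pos (by omega)]
      · rw [if_neg (by omega)]
        simp [Prod.ext_iff]
        omega
    rw [walkPos, dif_pos (by tauto), hstep]
    show (tr, c + s) :: walkPos tr tc tr (c + s) = _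
    rw [ih (c + s) (by push_cast at hc ⊢; rcases hs with rfl | rfl <;> omega)]
    rw [List.range_succ_eq_map, List.map_cons, List.map_map]
    congr 1
    · simp only [Prod.mk.injEq, Nat.cast_zero]
      refine ⟨trivial, by ring⟩
    · apply List.map_congr_left
      intro k _
      simp only [Function.comp_apply, Prod.mk.injEq]
      refine ⟨trivial, by push_cast; ring⟩

-- the row phase of a leg is exactly a range comprehension followed by the column phase
theorem walkPos_row_s (tr tc s : Int) (hs : s = 1 ∨ s = -1) : ∀ (n : Nat) (r c : Int),
    tr - r = s * n →
    walkPos tr tc r c =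
      (List.range n).map (fun (k : Nat) => (r + s * (1 + (k : Int)), c)) ++ walkPos tr tc tr c := by
  intro n
  induction n with
  | zero =>
    intro r c hr
    have : r = tr := by omega
    subst this
    simp
  | succ n ih =>
    intro r c hr
    have hne : r ≠ tr := by
      rcases hs with rfl | rfl <;> omega
    have hstep : pvStep tr tc r c = (r + s, c) := by
      unfold pvStep
      rw [if_pos hne]
      rcases hs with rfl | rfl
      · rw [if_pos (by omega)]
      · rw [if_neg (by omega)]
        simp [Prod.ext_iff]
        omega
    rw [walkPos, dif_pos (by tauto), hstep]
    show (r + s, c) :: walkPos tr tc (r + s) c = _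
    rw [ih (r + s) c (by push_cast at hr ⊢; rcases hs with rfl | rfl <;> omega)]
    rw [List.range_succ_eq_map, List.map_cons, List.map_map, List.cons_append]
    congr 1
    · simp only [Prod.mk.injEq, Nat.cast_zero]
      refine ⟨by ring, trivial⟩
    · congr 1
      apply List.map_congr_left
      intro k _
      simp only [Function.comp_apply, Prod.mk.injEq]
      refine ⟨by push_cast; ring, trivial⟩

-- B's _seg builds exactly the unit-step orbit of the leg
theorem segPyB_eq (r c tr tc : Int) : segPyB r c tr tc = walkPos tr tc r c := by
  have habs : ∀ a : Int, (|a| + 1 - 1).toNat = a.natAbs := by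
    intro a
    rw [Int.abs_eq_natAbs]
    omega
  have hrow := walkPos_row_s tr tc (if tr ≥ r then 1 else -1) (by split_ifs <;> simp)
    (tr - r).natAbs r c (by split_ifs <;> omega)
  have hcol := walkPos_col_s tr tc (if tc ≥ c then 1 else -1) (by split_ifs <;> simp)
    (tc - c).natAbs c (by split_ifs <;> omega)
  unfold segPyB
  simp only [PySem.List.pyRange_one, habs, List.map_map]
  rw [hrow, hcol]
  rfl

-- B's inner path-building fold equals pathSeg
theorem foldB_path (points : List (List Int)) (route : List Int) (js : List Int) :
    ∀ (r c : Int) (acc : List (Int × Int)),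
    js.foldl (fun (ps : Int × Int × List (Int × Int)) j =>
        let tgt := getPointB points (PySem.List.pyGetD route j 0)
        (tgt.1, tgt.2, ps.2.2 ++ segPyB ps.1 ps.2.1 tgt.1 tgt.2)) (r, c, acc) =
      ((pathSeg points route js (r, c)).1.1, (pathSeg points route js (r, c)).1.2,
       acc ++ (pathSeg points route js (r, c)).2) := by
  induction js with
  | nil => intro r c acc; simp [pathSeg]
  | cons j js ih =>
    intro r c acc
    simp only [List.foldl_cons]
    rw [ih]
    simp only [pathSeg, getPointB_eq, segPyB_eq, List.append_assoc, Prod.mk.eta]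

-- A's timestamped event stream over a route is B's path, stamped consecutively
theorem pureSeg_snd (points : List (List Int)) (route : List Int) : ∀ (js : List Int) (r c t : Int),
    (pureSeg points route js (r, c, t)).2 = stampEv (t + 1) ((pathSeg points route js (r, c)).2) := by
  intro js
  induction js with
  | nil => intro r c t; simp [pureSeg, pathSeg, stampEv]
  | cons j js ih =>
    intro r c t
    simp only [pureSeg, pathSeg]
    rw [pureWalk_snd, pureWalk_fst, stampEv_append, walkPos_length]
    congr 1
    have hih := ih (pvPt points (PySem.List.pyGetD route j 0)).1
      (pvPt points (PySem.List.pyGetD route j 0)).2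
      (t + pvDist (pvPt points (PySem.List.pyGetD route j 0)).1
        (pvPt points (PySem.List.pyGetD route j 0)).2 r c)
    simp only [Prod.mk.eta] at hih
    rw [hih]
    congr 1
    ring

-- one robot's events are its stamped path
theorem evRobot_eq_stamp (points : List (List Int)) (M : Int) (route : List Int) :
    evRobot points M route =
      stampEv 0 (((pvPt points (PySem.List.pyGetD route 0 0)).1,
                  (pvPt points (PySem.List.pyGetD route 0 0)).2) ::
        (pathSeg points route (PySem.List.pyRange 1 M 1)
          ((pvPt points (PySem.List.pyGetD route 0 0)).1,
           (pvPt points (PySem.List.pyGetD route 0 0)).2)).2) := by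
  simp only [evRobot, stampEv, Prod.mk.eta]
  rw [pureSeg_snd]

-- B's seen/collided step
def stepSC (sc : PySem.Set (Int × Int × Int) × PySem.Set (Int × Int × Int))
    (tp : Int × Int × Int) : PySem.Set (Int × Int × Int) × PySem.Set (Int × Int × Int) :=
  if PySem.Set.contains sc.1 tp then (sc.1, PySem.Set.add sc.2 tp)
  else (PySem.Set.add sc.1 tp, sc.2)

-- B's outer fold processes exactly the concatenated event stream evAll
theorem foldRobotsB_eq (points : List (List Int)) (M : Int) (routes' : List (List Int))
    (sc : PySem.Set (Int × Int × Int) × PySem.Set (Int × Int × Int)) :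
    routes'.foldl
      (fun sc route =>
        let s := getPointB points (PySem.List.pyGetD route 0 0)
        let bp := (PySem.List.pyRange 1 M 1).foldl
          (fun (ps : Int × Int × List (Int × Int)) j =>
            let tgt := getPointB points (PySem.List.pyGetD route j 0)
            (tgt.1, tgt.2, ps.2.2 ++ segPyB ps.1 ps.2.1 tgt.1 tgt.2))
          (s.1, s.2, [(s.1, s.2)])
        (PySem.List.enumerate bp.2.2 0).foldl
          (fun sc tp =>
            if PySem.Set.contains sc.1 tp then (sc.1, PySem.Set.add sc.2 tp)
            else (PySem.Set.add sc.1 tp, sc.2))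
          sc) sc =
      (routes'.flatMap (evRobot points M)).foldl stepSC sc := by
  induction routes' generalizing sc with
  | nil => rfl
  | cons rt rts ih =>
    simp only [List.foldl_cons, List.flatMap_cons, List.foldl_append]
    rw [ih]
    congr 1
    rw [foldB_path, enumerate_eq_stampEv]
    simp only [getPointB_eq, List.singleton_append]
    rw [evRobot_eq_stamp points M rt]
    rfl

-- the seen/collided invariant: collided holds exactly the events seen at least twice
theorem stepSC_fold (E : List (Int × Int × Int)) :
    ∀ seen coll : List (Int × Int × Int), seen.Nodup → coll.Nodup →
      (E.foldl stepSC (seen, coll)).2.Nodup ∧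
      (∀ x, x ∈ (E.foldl stepSC (seen, coll)).2 ↔
        x ∈ coll ∨ (x ∈ seen ∧ x ∈ E) ∨ 1 < E.count x) := by
  induction E with
  | nil =>
    intro seen coll hs hc
    refine ⟨hc, fun x => ?_⟩
    simp
  | cons e E ih =>
    intro seen coll hs hc
    have hbne : ∀ x : Int × Int × Int, ¬ x = e → ((e == x) = true → False) := by
      intro x hxe h
      have hex : e = x := by simpa using h
      exact hxe hex.symm
    simp only [List.foldl_cons, stepSC]
    by_cases he : e ∈ seen
    · rw [if_pos (by simpa using he)]
      obtain ⟨h1, h2⟩ := ih seen (PySem.Set.add coll e) hs (PySem.Set.nodup_add _ _ hc)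
      refine ⟨h1, fun x => ?_⟩
      rw [h2 x, PySem.Set.mem_add]
      constructor
      · rintro ((hx | rfl) | ⟨hxs, hxE⟩ | hcnt)
        · exact Or.inl hx
        · exact Or.inr (Or.inl ⟨he, List.mem_cons_self⟩)
        · exact Or.inr (Or.inl ⟨hxs, List.mem_cons_of_mem _ hxE⟩)
        · refine Or.inr (Or.inr ?_)
          rw [List.count_cons]
          split_ifs <;> omega
      · rintro (hx | ⟨hxs, hxE⟩ | hcnt)
        · exact Or.inl (Or.inl hx)
        · rcases List.mem_cons.mp hxE with rfl | hxE'
          · exact Or.inl (Or.inr rfl)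
          · exact Or.inr (Or.inl ⟨hxs, hxE'⟩)
        · rw [List.count_cons] at hcnt
          by_cases hxe : x = e
          · subst hxe
            exact Or.inl (Or.inr rfl)
          · refine Or.inr (Or.inr ?_)
            rw [if_neg (hbne x hxe)] at hcnt
            omega
    · rw [if_neg (by simpa using he)]
      obtain ⟨h1, h2⟩ := ih (PySem.Set.add seen e) coll (PySem.Set.nodup_add _ _ hs) hc
      refine ⟨h1, fun x => ?_⟩
      rw [h2 x]
      constructor
      · rintro (hx | ⟨hxs, hxE⟩ | hcnt)
        · exact Or.inl hx
        · rcases (PySem.Set.mem_add _ _ _).mp hxs with hxs' | rfl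
          · exact Or.inr (Or.inl ⟨hxs', List.mem_cons_of_mem _ hxE⟩)
          · refine Or.inr (Or.inr ?_)
            have hp : 0 < E.count x := List.count_pos_iff.mpr hxE
            rw [List.count_cons, if_pos (by simp)]
            omega
        · refine Or.inr (Or.inr ?_)
          rw [List.count_cons]
          split_ifs <;> omega
      · rintro (hx | ⟨hxs, hxE⟩ | hcnt)
        · exact Or.inl hx
        · rcases List.mem_cons.mp hxE with rfl | hxE'
          · exact absurd hxs he
          · exact Or.inr (Or.inl ⟨(PySem.Set.mem_add _ _ _).mpr (Or.inl hxs), hxE'⟩)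
        · rw [List.count_cons] at hcnt
          by_cases hxe : x = e
          · subst hxe
            rw [if_pos (by simp)] at hcnt
            have hxE' : x ∈ E := List.count_pos_iff.mp (by omega)
            exact Or.inr (Or.inl ⟨(PySem.Set.mem_add _ _ _).mpr (Or.inr rfl), hxE'⟩)
          · rw [if_neg (hbne x hxe)] at hcnt
            refine Or.inr (Or.inr ?_)
            omega

theorem solutionB_eq (points routes : List (List Int)) :
    solution_alt points routes =
      ((PySem.Set.ofList (evAll points routes)).countP
        (fun k => decide (((evAll points routes).count k : Int) > 1)) : Int) := by
  unfold solution_alt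
  rw [foldRobotsB_eq]
  rw [show routes.flatMap (evRobot points ((PySem.List.pyGetD routes 0 []).length : Int)) =
      evAll points routes from rfl]
  set E := evAll points routes with hE
  obtain ⟨hnd, hmem⟩ := stepSC_fold E [] [] List.nodup_nil List.nodup_nil
  have hiff : ∀ x, x ∈ (E.foldl stepSC (PySem.Set.empty, PySem.Set.empty)).2 ↔ 1 < E.count x := by
    intro x
    rw [show (PySem.Set.empty : PySem.Set (Int × Int × Int)) = ([] : List (Int × Int × Int)) from rfl]
    rw [hmem x]
    simp
  have hperm : (E.foldl stepSC (PySem.Set.empty, PySem.Set.empty)).2.Perm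
      ((PySem.Set.ofList E).filter (fun k => decide (((E.count k : Nat) : Int) > 1))) := by
    apply (List.perm_ext_iff_of_nodup ?_ ?_).mpr
    · intro x
      rw [hiff x, List.mem_filter, PySem.Set.mem_ofList]
      constructor
      · intro h
        exact ⟨List.count_pos_iff.mp (by omega), by
          simp only [decide_eq_true_eq]
          exact_mod_cast h⟩
      · rintro ⟨_, h⟩
        simp only [decide_eq_true_eq] at h
        exact_mod_cast h
    · exact hnd
    · exact (PySem.Set.nodup_ofList E).filter _
  have hlen := hperm.length_eq
  rw [show PySem.Set.len (E.foldl stepSC (PySem.Set.empty, PySem.Set.empty)).2 =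
      (((E.foldl stepSC (PySem.Set.empty, PySem.Set.empty)).2.length : Nat) : Int) from rfl]
  rw [hlen, ← List.countP_eq_length_filter]

-- ===== value of A's aggregation phase =====

theorem countAtA_eq (l : List (Int × Int)) :
    countAtA l = ((PySem.Set.ofList l).countP (fun p => decide ((l.count p : Int) > 1)) : Int) := by
  unfold countAtA
  rw [← PySem.Dict.counter_eq_foldl, PySem.List.foldl_ite_add_one
    (fun k => (PySem.Dict.counter l).getD k 0 > 1), PySem.Dict.keys_counter, zero_add]
  congr 1
  apply List.countP_congr
  intro k _
  rw [PySem.Dict.getD_counter]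

theorem phase2A_eq (scen : List (List (Int × Int)))
    (DC : ∀ j k : Nat, j ≤ k → scen.getD j [] = [] → scen.getD k [] = []) :
    ∀ (fuel i : Nat) (ans : Int),
      phase2A scen fuel i ans =
        ans + ((List.range fuel).map (fun m => countAtA (scen.getD (i + m) []))).sum := by
  intro fuel
  induction fuel with
  | zero => intro i ans; simp [phase2A]
  | succ n ih =>
    intro i ans
    rw [phase2A]
    by_cases hs : scen.getD i [] = []
    · rw [if_pos hs]
      have hz : ((List.range (n + 1)).map (fun m => countAtA (scen.getD (i + m) []))).sum = 0 := by
        apply List.sum_eq_zero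
        intro x hx
        obtain ⟨m, _, rfl⟩ := List.mem_map.mp hx
        rw [DC i (i + m) (Nat.le_add_right _ _) hs]
        rfl
      rw [hz, add_zero]
    · rw [if_neg hs, ih (i + 1) (ans + countAtA (scen.getD i []))]
      rw [List.range_succ_eq_map, List.map_cons, List.sum_cons, List.map_map]
      have hm : ((List.range n).map (fun m => countAtA (scen.getD (i + 1 + m) []))).sum =
          ((List.range n).map ((fun m => countAtA (scen.getD (i + m) [])) ∘ Nat.succ)).sum := by
        congr 1
        apply List.map_congr_left
        intro m _
        simp only [Function.comp]
        congr 2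
        omega
      rw [hm, Nat.add_zero]
      ring

theorem foldl_addEvA_length (E : List (Int × Int × Int)) (scen : List (List (Int × Int))) :
    (E.foldl addEvA scen).length = scen.length := by
  induction E generalizing scen with
  | nil => rfl
  | cons e E ih =>
    rw [List.foldl_cons, ih]
    unfold addEvA appendAtA
    split_ifs <;> simp

theorem foldl_addEvA_getD (E : List (Int × Int × Int)) (scen : List (List (Int × Int)))
    (hb : ∀ e ∈ E, 0 ≤ e.1 ∧ e.1 < (scen.length : Int)) (m : Nat) (hm : m < scen.length) :
    (E.foldl addEvA scen).getD m [] =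
      scen.getD m [] ++ (E.filter (fun e => e.1 == (m : Int))).map (fun e => e.2) := by
  induction E generalizing scen with
  | nil => simp
  | cons e E ih =>
    obtain ⟨he0, he1⟩ := hb e (List.mem_cons_self)
    have hset : addEvA scen e = scen.set e.1.toNat (scen.getD e.1.toNat [] ++ [e.2]) := by
      unfold addEvA appendAtA
      rw [if_pos ⟨he0, by omega⟩]
    rw [List.foldl_cons, hset, ih _ (fun e' he' => by
      have := hb e' (List.mem_cons_of_mem _ he')
      simpa using this) (by simpa using hm)]
    rw [List.filter_cons]
    by_cases heq : e.1 = (m : Int)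
    · have : e.1.toNat = m := by omega
      rw [if_pos (by simpa using heq)]
      simp only [List.getD, this, List.getElem?_set, if_pos rfl, if_pos hm, List.map_cons]
      simp [List.append_assoc]
    · have hne : e.1.toNat ≠ m := by omega
      rw [if_neg (by simpa using heq)]
      simp [List.getD, List.getElem?_set, hne]

-- ===== times of the event streams =====

theorem pureWalk_times (tr tc r c t : Int) :
    ∀ e ∈ (pureWalk tr tc r c t).2, t < e.1 ∧ e.1 ≤ t + pvDist tr tc r c := by
  fun_induction pureWalk tr tc r c t with
  | case1 r c t h rc' p ih =>
    have hd : pvDist tr tc rc'.1 rc'.2 + 1 = pvDist tr tc r c := pvStep_dec tr tc r c h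
    intro e he
    rw [show (p.1, (t + 1, rc'.1, rc'.2) :: p.2).2 = (t + 1, rc'.1, rc'.2) :: p.2 from rfl] at he
    rcases List.mem_cons.mp he with rfl | he'
    · have h0 : 0 ≤ pvDist tr tc rc'.1 rc'.2 := by unfold pvDist; omega
      constructor
      · omega
      · show t + 1 ≤ _
        omega
    · have := ih e he'
      constructor <;> omega
  | case2 r c t h =>
    intro e he
    simp at he

theorem pureWalk_onto (tr tc r c t : Int) :
    ∀ s : Int, t < s → s ≤ t + pvDist tr tc r c → ∃ e ∈ (pureWalk tr tc r c t).2, e.1 = s := by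
  fun_induction pureWalk tr tc r c t with
  | case1 r c t h rc' p ih =>
    have hd : pvDist tr tc rc'.1 rc'.2 + 1 = pvDist tr tc r c := pvStep_dec tr tc r c h
    intro s hs1 hs2
    rw [show (p.1, (t + 1, rc'.1, rc'.2) :: p.2).2 = (t + 1, rc'.1, rc'.2) :: p.2 from rfl]
    by_cases hse : s = t + 1
    · exact ⟨(t + 1, rc'.1, rc'.2), List.mem_cons_self, hse.symm⟩
    · obtain ⟨e, he, hee⟩ := ih s (by omega) (by omega)
      exact ⟨e, List.mem_cons_of_mem _ he, hee⟩
  | case2 r c t h =>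
    intro s hs1 hs2
    have hr : r = tr := by tauto
    have hc : c = tc := by tauto
    subst hr; subst hc
    unfold pvDist at hs2
    omega

theorem pvPathLen_nonneg (l : List (Int × Int)) : 0 ≤ pvPathLen l := by
  induction l with
  | nil => simp [pvPathLen]
  | cons p rest ih =>
    cases rest with
    | nil => simp [pvPathLen]
    | cons q rest' =>
      rw [pvPathLen]
      have : 0 ≤ pvManh p q := by unfold pvManh; positivity
      omega

theorem pvManh_dist (r c : Int) (z : Int × Int) : pvManh (r, c) z = pvDist z.1 z.2 r c := by
  unfold pvManh pvDist
  rw [Int.abs_eq_natAbs, Int.abs_eq_natAbs]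

theorem pureSeg_spec (points : List (List Int)) (route : List Int) :
    ∀ (js : List Int) (r c t : Int),
      (pureSeg points route js (r, c, t)).1.2.2 =
          t + pvPathLen ((r, c) :: js.map (fun j => pvPt points (PySem.List.pyGetD route j 0))) ∧
      (∀ e ∈ (pureSeg points route js (r, c, t)).2,
        t < e.1 ∧ e.1 ≤ (pureSeg points route js (r, c, t)).1.2.2) ∧
      (∀ s : Int, t < s → s ≤ (pureSeg points route js (r, c, t)).1.2.2 →
        ∃ e ∈ (pureSeg points route js (r, c, t)).2, e.1 = s) := by
  intro js
  induction js with
  | nil =>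
    intro r c t
    refine ⟨by simp [pureSeg, pvPathLen], by simp [pureSeg], ?_⟩
    intro s h1 h2
    simp only [pureSeg] at h2
    omega
  | cons j js ih =>
    intro r c t
    have hd0 : 0 ≤ pvDist (pvPt points (PySem.List.pyGetD route j 0)).1
        (pvPt points (PySem.List.pyGetD route j 0)).2 r c := by unfold pvDist; omega
    simp only [pureSeg, pureWalk_fst, List.map_cons]
    obtain ⟨ih1, ih2, ih3⟩ := ih (pvPt points (PySem.List.pyGetD route j 0)).1
      (pvPt points (PySem.List.pyGetD route j 0)).2
      (t + pvDist (pvPt points (PySem.List.pyGetD route j 0)).1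
        (pvPt points (PySem.List.pyGetD route j 0)).2 r c)
    have hPL := pvPathLen_nonneg ((pvPt points (PySem.List.pyGetD route j 0)) ::
      js.map (fun j => pvPt points (PySem.List.pyGetD route j 0)))
    have hend : (pureSeg points route js ((pvPt points (PySem.List.pyGetD route j 0)).1,
        (pvPt points (PySem.List.pyGetD route j 0)).2,
        t + pvDist (pvPt points (PySem.List.pyGetD route j 0)).1
          (pvPt points (PySem.List.pyGetD route j 0)).2 r c)).1.2.2 =
        t + pvPathLen ((r, c) :: pvPt points (PySem.List.pyGetD route j 0) ::
          js.map (fun j => pvPt points (PySem.List.pyGetD route j 0))) := by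
      rw [ih1, pvPathLen, pvManh_dist]
      simp only [Prod.mk.eta]
      omega
    refine ⟨hend, ?_, ?_⟩
    · intro e he
      rcases List.mem_append.mp he with hw | hq
      · have := pureWalk_times _ _ r c t e hw
        rw [hend]
        constructor
        · omega
        · have h2 := this.2
          rw [pvPathLen, pvManh_dist]
          try simp only [Prod.mk.eta]
          omega
      · have := ih2 e hq
        rw [hend]
        rw [ih1] at this
        simp only [Prod.mk.eta] at this
        rw [pvPathLen, pvManh_dist]
        constructor <;> omega
    · intro s hs1 hs2
      rw [hend, pvPathLen, pvManh_dist] at hs2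
      try simp only [Prod.mk.eta] at hs2
      by_cases hsd : s ≤ t + pvDist (pvPt points (PySem.List.pyGetD route j 0)).1
          (pvPt points (PySem.List.pyGetD route j 0)).2 r c
      · obtain ⟨e, he, hee⟩ := pureWalk_onto _ _ r c t s hs1 hsd
        exact ⟨e, List.mem_append_left _ he, hee⟩
      · obtain ⟨e, he, hee⟩ := ih3 s (by omega) (by rw [ih1]; simp only [Prod.mk.eta]; omega)
        exact ⟨e, List.mem_append_right _ he, hee⟩

theorem targets_eq (rt : List Int) (Mn : Nat) (h1 : 1 ≤ Mn) (h2 : Mn ≤ rt.length) :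
    (PySem.List.pyRange 1 (Mn : Int) 1).map (fun j => PySem.List.pyGetD rt j 0) =
      (rt.take Mn).drop 1 := by
  rw [PySem.List.pyRange_one, List.map_map]
  apply List.ext_getElem
  · simp
    omega
  · intro i hi1 hi2
    simp only [List.getElem_map, List.getElem_range, Function.comp, List.getElem_drop,
      List.getElem_take]
    rw [PySem.List.pyGetD_eq_getElem rt 0 (by omega) (by
      simp at hi1
      omega)]
    try congr 1
    try omega

theorem evRobot_times (points : List (List Int)) (rt : List Int) (Mn : Nat)
    (h1 : 1 ≤ Mn) (h2 : Mn ≤ rt.length) :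
    (∀ e ∈ evRobot points (Mn : Int) rt,
      0 ≤ e.1 ∧ e.1 ≤ pvPathLen ((rt.take Mn).map (pvPt points))) ∧
    (∀ s : Int, 0 ≤ s → s ≤ pvPathLen ((rt.take Mn).map (pvPt points)) →
      ∃ e ∈ evRobot points (Mn : Int) rt, e.1 = s) := by
  obtain ⟨m, rfl⟩ : ∃ m, Mn = m + 1 := ⟨Mn - 1, by omega⟩
  cases rt with
  | nil =>
    simp at h2
  | cons a rt' =>
    have hmap : ((PySem.List.pyRange 1 ((m + 1 : Nat) : Int) 1).map
        (fun j => pvPt points (PySem.List.pyGetD (a :: rt') j 0))) =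
        (((a :: rt').take (m + 1)).drop 1).map (pvPt points) := by
      rw [show (fun j => pvPt points (PySem.List.pyGetD (a :: rt') j 0)) =
            (pvPt points) ∘ (fun j => PySem.List.pyGetD (a :: rt') j 0) from rfl,
          ← List.map_map, targets_eq _ _ h1 h2]
    have htake : ((a :: rt').take (m + 1)).map (pvPt points) =
        pvPt points a :: (((a :: rt').take (m + 1)).drop 1).map (pvPt points) := by
      rw [List.take_succ_cons]
      simp
    have hget : PySem.List.pyGetD (a :: rt') 0 (0 : Int) = a := by
      rw [PySem.List.pyGetD_eq_getElem _ _ (by omega) (by simp)]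
      rfl
    obtain ⟨e1, e2, e3⟩ := pureSeg_spec points (a :: rt')
      (PySem.List.pyRange 1 ((m + 1 : Nat) : Int) 1)
      (pvPt points (PySem.List.pyGetD (a :: rt') 0 0)).1
      (pvPt points (PySem.List.pyGetD (a :: rt') 0 0)).2 0
    have hLe : (pureSeg points (a :: rt') (PySem.List.pyRange 1 ((m + 1 : Nat) : Int) 1)
        ((pvPt points (PySem.List.pyGetD (a :: rt') 0 0)).1,
         (pvPt points (PySem.List.pyGetD (a :: rt') 0 0)).2, 0)).1.2.2 =
        pvPathLen (((a :: rt').take (m + 1)).map (pvPt points)) := by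
      rw [e1, htake]
      try simp only [Prod.mk.eta]
      rw [hget, hmap]
      omega
    have hL0 := pvPathLen_nonneg (((a :: rt').take (m + 1)).map (pvPt points))
    constructor
    · intro e he
      simp only [evRobot] at he
      rcases List.mem_cons.mp he with rfl | he'
      · exact ⟨le_refl 0, hL0⟩
      · have := e2 e he'
        rw [hLe] at this
        exact ⟨by omega, this.2⟩
    · intro s' hs0 hsL
      by_cases hz : s' = 0
      · subst hz
        exact ⟨_, List.mem_cons_self, rfl⟩
      · obtain ⟨e, he, hee⟩ := e3 s' (by omega) (by rw [hLe]; exact hsL)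
        exact ⟨e, List.mem_cons_of_mem _ he, hee⟩

-- ===== the counting identity =====

theorem sliceCount (E : List (Int × Int × Int)) (m : Int) (pos : Int × Int) :
    ((E.filter (fun e => e.1 == m)).map (fun e => e.2)).count pos = E.count (m, pos.1, pos.2) := by
  induction E with
  | nil => rfl
  | cons e E ih =>
    rw [List.filter_cons, List.count_cons]
    by_cases h1 : e.1 = m
    · rw [if_pos (by simpa using h1), List.map_cons, List.count_cons, ih]
      congr 1
      by_cases h2 : e.2 = pos
      · rw [if_pos (by simpa using h2), if_pos (by
          simp only [beq_iff_eq]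
          exact Prod.ext h1 (by rw [h2]))]
      · rw [if_neg (by simpa using h2), if_neg (by
          simp only [beq_iff_eq]
          intro hc
          exact h2 (by rw [hc]))]
    · rw [if_neg (by simpa using h1), ih]
      have : ¬ (e == (m, pos.1, pos.2)) = true := by
        simp only [beq_iff_eq]
        intro hc
        exact h1 (by rw [hc])
      rw [if_neg this, add_zero]

theorem slice_eq (E : List (Int × Int × Int)) (m : Int) :
    ((PySem.Set.ofList ((E.filter (fun e => e.1 == m)).map (fun e => e.2))).countP
        (fun p => decide ((((E.filter (fun e => e.1 == m)).map (fun e => e.2)).count p : Int) > 1)) : Int) =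
      (((PySem.Set.ofList E).filter (fun k => k.1 == m)).countP
        (fun k => decide ((E.count k : Int) > 1)) : Int) := by
  have hperm : (PySem.Set.ofList ((E.filter (fun e => e.1 == m)).map (fun e => e.2))).Perm
      (((PySem.Set.ofList E).filter (fun k => k.1 == m)).map (fun k => k.2)) := by
    apply (List.perm_ext_iff_of_nodup (PySem.Set.nodup_ofList _) ?_).mpr
    · intro pos
      simp [PySem.Set.mem_ofList, List.mem_map, List.mem_filter, beq_iff_eq]
    · apply List.Nodup.map_on
      · intro x hx y hy hxy
        have hx' := (List.mem_filter.mp hx).2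
        have hy' := (List.mem_filter.mp hy).2
        simp only [beq_iff_eq] at hx' hy'
        exact Prod.ext (hx'.trans hy'.symm) hxy
      · exact (PySem.Set.nodup_ofList E).filter _
  congr 1
  have h1 : (PySem.Set.ofList ((E.filter (fun e => e.1 == m)).map (fun e => e.2))).countP
      (fun p => decide ((((E.filter (fun e => e.1 == m)).map (fun e => e.2)).count p : Int) > 1)) =
      (PySem.Set.ofList ((E.filter (fun e => e.1 == m)).map (fun e => e.2))).countP
      (fun p => decide ((E.count (m, p.1, p.2) : Int) > 1)) :=
    List.countP_congr (fun pos _ => by simp only [sliceCount])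
  have h2 : (PySem.Set.ofList ((E.filter (fun e => e.1 == m)).map (fun e => e.2))).countP
      (fun p => decide ((E.count (m, p.1, p.2) : Int) > 1)) =
      (((PySem.Set.ofList E).filter (fun k => k.1 == m)).map (fun k => k.2)).countP
      (fun p => decide ((E.count (m, p.1, p.2) : Int) > 1)) :=
    hperm.countP_eq _
  have h3 : (((PySem.Set.ofList E).filter (fun k => k.1 == m)).map (fun k => k.2)).countP
      (fun p => decide ((E.count (m, p.1, p.2) : Int) > 1)) =
      ((PySem.Set.ofList E).filter (fun k => k.1 == m)).countP
      (fun k => decide ((E.count (m, k.2.1, k.2.2) : Int) > 1)) :=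
    List.countP_map
  have h4 : ((PySem.Set.ofList E).filter (fun k => k.1 == m)).countP
      (fun k => decide ((E.count (m, k.2.1, k.2.2) : Int) > 1)) =
      ((PySem.Set.ofList E).filter (fun k => k.1 == m)).countP
      (fun k => decide ((E.count k : Int) > 1)) := by
    apply List.countP_congr
    intro k hk
    have hk1 := (List.mem_filter.mp hk).2
    simp only [beq_iff_eq] at hk1
    rw [← hk1]
  rw [h1, h2, h3, h4]

theorem sum_indicator (n : Nat) (t : Int) (h0 : 0 ≤ t) (h1 : t < (n : Int)) (v : Int) :
    ((List.range n).map (fun m : Nat => if (m : Int) = t then v else 0)).sum = v := by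
  induction n with
  | zero => exact absurd h1 (by omega)
  | succ n ih =>
    rw [List.range_succ, List.map_append, List.sum_append, List.map_singleton, List.sum_singleton]
    by_cases he : (n : Int) = t
    · rw [if_pos he]
      have hz : ((List.range n).map (fun m : Nat => if (m : Int) = t then v else 0)).sum = 0 := by
        apply List.sum_eq_zero
        intro x hx
        obtain ⟨k, hk, rfl⟩ := List.mem_map.mp hx
        rw [if_neg (by
          have := List.mem_range.mp hk
          omega)]
      rw [hz, zero_add]
    · rw [if_neg he, ih (by omega), add_zero]

theorem sum_slices (K : List (Int × Int × Int)) (p : (Int × Int × Int) → Bool) (n : Nat)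
    (hb : ∀ k ∈ K, 0 ≤ k.1 ∧ k.1 < (n : Int)) :
    ((List.range n).map (fun m : Nat => ((K.filter (fun k => k.1 == (m : Int))).countP p : Int))).sum =
      (K.countP p : Int) := by
  induction K with
  | nil =>
    simp
  | cons k K ih =>
    have hk := hb k List.mem_cons_self
    have hstep : ∀ m : Nat, (((k :: K).filter (fun k' => k'.1 == (m : Int))).countP p : Int) =
        ((K.filter (fun k' => k'.1 == (m : Int))).countP p : Int) +
        (if (m : Int) = k.1 then (if p k then (1 : Int) else 0) else 0) := by
      intro m
      rw [List.filter_cons]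
      by_cases h1 : k.1 = (m : Int)
      · rw [if_pos (by simpa using h1), List.countP_cons, if_pos h1.symm]
        push_cast
        split_ifs <;> omega
      · rw [if_neg (by simpa using h1), if_neg (fun hc => h1 hc.symm), add_zero]
    rw [List.map_congr_left (fun m _ => hstep m), PySem.List.sum_map_add_int, ih
      (fun k' hk' => hb k' (List.mem_cons_of_mem _ hk')),
      sum_indicator n k.1 hk.1 hk.2 (if p k then (1 : Int) else 0), List.countP_cons]
    push_cast
    split_ifs <;> omega

-- ===== VERDICT (by name: the statement is the Claim_ definition above) =====
theorem solution_spec : Claim_equal_solution := by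
  intro points routes _ hpre
  unfold Spec_solution
  obtain ⟨hne, hM1, hrt⟩ := hpre
  have hMeq : (PySem.List.pyGetD routes 0 []) = routes.headI := by
    cases routes with
    | nil => exact absurd rfl hne
    | cons a l =>
      rw [PySem.List.pyGetD_eq_getElem _ _ (by omega) (by simp)]
      rfl
  have hE : evAll points routes = routes.flatMap (evRobot points ((routes.headI.length : Nat) : Int)) := by
    unfold evAll
    rw [hMeq]
  have hbound : ∀ e ∈ evAll points routes, 0 ≤ e.1 ∧ e.1 < (20001 : Int) := by
    intro e he
    rw [hE] at he
    obtain ⟨rt, hrtm, hem⟩ := List.mem_flatMap.mp he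
    obtain ⟨hlen, _, hpath⟩ := hrt rt hrtm
    have hb := (evRobot_times points rt routes.headI.length hM1 hlen).1 e hem
    exact ⟨hb.1, by omega⟩
  have hlenF : ((evAll points routes).foldl addEvA (List.replicate 20001 [])).length = 20001 := by
    rw [foldl_addEvA_length, List.length_replicate]
  have hrep : ∀ m : Nat, (List.replicate 20001 ([] : List (Int × Int))).getD m [] = [] := by
    intro m
    unfold List.getD
    rw [List.getElem?_replicate]
    split_ifs <;> rfl
  have hchar : ∀ m : Nat, m < 20001 →
      ((evAll points routes).foldl addEvA (List.replicate 20001 [])).getD m [] =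
      ((evAll points routes).filter (fun e => e.1 == (m : Int))).map (fun e => e.2) := by
    intro m hm
    rw [foldl_addEvA_getD _ _ (by
        intro e he
        have hb := hbound e he
        rw [List.length_replicate]
        exact ⟨hb.1, by exact_mod_cast hb.2⟩) m (by
        rw [List.length_replicate]
        exact hm)]
    rw [hrep, List.nil_append]
  have hDC : ∀ j k : Nat, j ≤ k →
      ((evAll points routes).foldl addEvA (List.replicate 20001 [])).getD j [] = [] →
      ((evAll points routes).foldl addEvA (List.replicate 20001 [])).getD k [] = [] := by
    intro j k hjk hj
    by_cases hk : k < 20001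
    · by_contra hkne
      have hex : ∃ e ∈ evAll points routes, e.1 = (k : Int) := by
        rw [hchar k hk] at hkne
        obtain ⟨x, hx⟩ := List.exists_mem_of_ne_nil _ hkne
        obtain ⟨e, he, _⟩ := List.mem_map.mp hx
        have hf := List.mem_filter.mp he
        exact ⟨e, hf.1, by simpa using hf.2⟩
      obtain ⟨e, he, hek⟩ := hex
      rw [hE] at he
      obtain ⟨rt, hrtm, hem⟩ := List.mem_flatMap.mp he
      obtain ⟨hlen, _, hpath⟩ := hrt rt hrtm
      have hup := (evRobot_times points rt routes.headI.length hM1 hlen).1 e hem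
      have hjk' : (j : Int) ≤ (k : Int) := by exact_mod_cast hjk
      obtain ⟨e', he', hej⟩ := (evRobot_times points rt routes.headI.length hM1 hlen).2
        (j : Int) (by omega) (by omega)
      have he'' : e' ∈ evAll points routes := by
        rw [hE]
        exact List.mem_flatMap.mpr ⟨rt, hrtm, he'⟩
      have hjlt : j < 20001 := by omega
      rw [hchar j hjlt] at hj
      have hmem : e'.2 ∈ ((evAll points routes).filter (fun e => e.1 == (j : Int))).map
          (fun e => e.2) :=
        List.mem_map.mpr ⟨e', List.mem_filter.mpr ⟨he'', by simpa using hej⟩, rfl⟩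
      rw [hj] at hmem
      simp at hmem
    · rw [List.getD_eq_default _ _ (by omega)]
  rw [solutionA_eq, solutionB_eq, phase2A_eq _ hDC 20001 0 0, zero_add]
  have hterm : ∀ m ∈ List.range 20001,
      countAtA (((evAll points routes).foldl addEvA (List.replicate 20001 [])).getD (0 + m) []) =
      (((PySem.Set.ofList (evAll points routes)).filter (fun k => k.1 == (m : Int))).countP
        (fun k => decide (((evAll points routes).count k : Int) > 1)) : Int) := by
    intro m hm
    rw [Nat.zero_add, hchar m (List.mem_range.mp hm), countAtA_eq, slice_eq]
  rw [List.map_congr_left hterm, sum_slices (PySem.Set.ofList (evAll points routes)) _ 20001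
    (fun k hk => by
      have := hbound k ((PySem.Set.mem_ofList _ _).mp hk)
      exact ⟨this.1, by exact_mod_cast this.2⟩)]
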